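-- pv_equiv track=rewrite | github.com/prashuym/IKPrograms | Sort-Practice1-LexicographicalOrder.py | solve
-- ===== SOURCE A (Python) =====
-- def solve(arr):
--     #
--     # Write your code here.
--     #
--     res = {}
--     for pair in arr :
--         key, newName = pair.split(" ")
--         if key in res :
--             res[key][1].append(newName)
--             res[key][0] += 1
--         else : res[key] = [1, [newName]]
--
--     for key, value in res.items() : res[key] = "%s:%s,%s" % (key, value[0], max(value[1]))
--     return list(res.values())
-- ===== SOURCE B (Python) =====
-- def solve(arr):
--     # Dict-free staged-passes version: split all lines once, collect keys in
--     # first-appearance order into a plain list, then for each key scan the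
--     # split pairs to count its lines and take the lexicographic max name.
--     pairs = []
--     for line in arr:
--         k, n = line.split(" ")
--         pairs.append((k, n))
--     keys = []
--     for k, _ in pairs:
--         if k not in keys:
--             keys.append(k)
--     out = []
--     for k in keys:
--         names = [n for kk, n in pairs if kk == k]
--         out.append("%s:%s,%s" % (k, len(names), max(names)))
--     return out
-- ===== Notes on version B (the rewrite author's own statement) =====
-- stated objective: alternative
-- what changed: B uses no dict at all: it splits every line once, collects the distinct keys in first-appearance order into a plain list, and then for each key scans the split pairs to count its lines and take the lexicographic max name, instead of A's incremental dict of per-key name lists rewritten in a second dict-mutation pass.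
import Mathlib
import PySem

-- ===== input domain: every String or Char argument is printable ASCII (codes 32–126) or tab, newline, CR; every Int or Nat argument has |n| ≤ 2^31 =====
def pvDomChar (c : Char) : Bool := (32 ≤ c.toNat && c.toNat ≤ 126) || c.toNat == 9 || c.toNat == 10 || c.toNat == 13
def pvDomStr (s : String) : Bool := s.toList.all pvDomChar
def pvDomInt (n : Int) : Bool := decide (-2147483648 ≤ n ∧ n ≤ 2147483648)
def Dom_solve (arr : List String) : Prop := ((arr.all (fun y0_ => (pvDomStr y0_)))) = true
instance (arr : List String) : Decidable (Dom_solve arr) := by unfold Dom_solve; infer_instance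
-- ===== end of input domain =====

-- B replaces A's incremental dict of per-key name lists (plus a second dict-rewriting
-- pass with max()) by a dict-free staged computation: split all lines once, collect the
-- distinct keys in first-appearance order into a plain list, then for each key filter
-- the split pairs to count and take the lexicographic max name (alternative, O(n*k)).


-- ===== PORT A =====
-- 'key, newName = pair.split(" ")': Pre_solve guarantees exactly two parts; the
-- getD defaults are never read on admitted inputs.
def solveParts (pair : String) : List String := (PySem.Str.split? pair " ").getD []

-- body of A's first loop: append the name, bump the count (one combined dict write)
def solveAStep (d : PySem.Dict String (Int × List String)) (pair : String) :
    PySem.Dict String (Int × List String) :=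
  let key := (solveParts pair).getD 0 ""
  let newName := (solveParts pair).getD 1 ""
  if d.contains key then
    d.modify key (0, []) (fun v => (v.1 + 1, v.2 ++ [newName]))
  else
    d.insert key (1, [newName])

-- second loop 'res[key] = "%s:%s,%s" % (key, value[0], max(value[1]))' overwrites each
-- value in place (order kept), then list(res.values()): one map over the items.
def solve (arr : List String) : List String :=
  let res := arr.foldl solveAStep PySem.Dict.empty
  res.items.map (fun p =>
    p.1 ++ ":" ++ PySem.Int.toStr p.2.1 ++ "," ++ ((PySem.List.max? p.2.2 (fun x => x)).getD ""))

-- ===== PORT B =====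
-- first loop of Source B: split each line, append the (key, name) pair
def solvePairs (arr : List String) : List (String × String) :=
  arr.foldl (fun ps line =>
    ps ++ [((solveParts line).getD 0 "", (solveParts line).getD 1 "")]) []

-- second loop of Source B: 'if k not in keys: keys.append(k)' — first-appearance key order
def solveKeys (ps : List (String × String)) : List String :=
  ps.foldl (fun ks kn => if ks.contains kn.1 then ks else ks ++ [kn.1]) []

-- third loop of Source B: per-key comprehension over the pairs, then the format string
def solve_alt (arr : List String) : List String :=
  let pairs := solvePairs arr
  (solveKeys pairs).foldl (fun out k =>
    let names := (pairs.filter (fun kn => kn.1 == k)).map (fun kn => kn.2)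
    out ++ [k ++ ":" ++ PySem.Int.toStr (names.length : Int) ++ "," ++
      ((PySem.List.max? names (fun x => x)).getD "")]) []

-- ===== PRECONDITION & SPEC =====
-- Pre_ excludes exactly the lines on which 'key, newName = pair.split(" ")' raises
-- ValueError in A (and in B): those not splitting into exactly two parts.
def Pre_solve (arr : List String) : Prop :=
  ∀ pair ∈ arr, ((PySem.Str.split? pair " ").getD []).length = 2
instance (arr : List String) : Decidable (Pre_solve arr) := by unfold Pre_solve; infer_instance

def pvWitness_solve : List String := ["a x", "b y", "a z", "a x"]

def Spec_solve (arr : List String) (out : List String) : Prop := out = solve_alt arr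
instance (arr : List String) (out : List String) : Decidable (Spec_solve arr out) := by unfold Spec_solve; infer_instance

-- ===== CLAIM (what is proved, stated in full; the proofs are below) =====
def Claim_equal_solve : Prop := ∀ (arr : List String), Dom_solve arr → Pre_solve arr → Spec_solve arr (solve arr)

-- ===== LEMMAS AND PROOFS =====

-- the split of one line, as a pair (what both loops extract from a line)
def splitF (pair : String) : String × String :=
  ((solveParts pair).getD 0 "", (solveParts pair).getD 1 "")

-- A's loop body on an already split pair
def stepP (d : PySem.Dict String (Int × List String)) (q : String × String) :
    PySem.Dict String (Int × List String) :=
  if d.contains q.1 then d.modify q.1 (0, []) (fun v => (v.1 + 1, v.2 ++ [q.2]))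
  else d.insert q.1 (1, [q.2])

-- B's key-collection body
def keyStep (ks : List String) (q : String × String) : List String :=
  if ks.contains q.1 then ks else ks ++ [q.1]

-- count and name list of a key, read off the pair list
def entry (ps : List (String × String)) (k : String) : Int × List String :=
  (((ps.filter (fun q => q.1 == k)).length : Int),
   (ps.filter (fun q => q.1 == k)).map (fun q => q.2))

theorem mem_keys_foldl (ps : List (String × String)) (acc : List String) (x : String) :
    x ∈ ps.foldl keyStep acc ↔ x ∈ acc ∨ x ∈ ps.map Prod.fst := by
  induction ps generalizing acc with
  | nil => simp
  | cons q t ih =>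
    simp only [List.foldl_cons, ih, keyStep, List.map_cons, List.mem_cons]
    by_cases h : acc.contains q.1 = true
    · have hq : q.1 ∈ acc := by simpa using h
      simp only [h, if_pos]
      constructor
      · rintro (hx | hx)
        · exact Or.inl hx
        · exact Or.inr (Or.inr hx)
      · rintro (hx | rfl | hx)
        · exact Or.inl hx
        · exact Or.inl hq
        · exact Or.inr hx
    · simp only [h, Bool.false_eq_true, if_false, List.mem_append, List.mem_singleton]
      tauto

theorem entry_append_self (ps : List (String × String)) (q : String × String) :
    entry (ps ++ [q]) q.1 =
      ((entry ps q.1).1 + 1, (entry ps q.1).2 ++ [q.2]) := by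
  simp [entry, List.filter_append]

theorem entry_append_ne (ps : List (String × String)) (q : String × String) (k : String)
    (h : q.1 ≠ k) : entry (ps ++ [q]) k = entry ps k := by
  simp [entry, List.filter_append, h]

theorem entry_of_not_mem (ps : List (String × String)) (k : String)
    (h : k ∉ ps.map Prod.fst) : entry ps k = (0, []) := by
  have hf : ps.filter (fun q => q.1 == k) = [] := by
    rw [List.filter_eq_nil_iff]
    intro q hq
    simp only [beq_iff_eq]
    intro hqk
    exact h (List.mem_map.2 ⟨q, hq, hqk⟩)
  simp [entry, hf]

theorem any_beq_symm {a : Type} [BEq a] [LawfulBEq a] (K : List a) (x : a) :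
    K.any (fun k => k == x) = K.contains x := by
  rw [List.contains_eq_any_beq, Bool.eq_iff_iff, List.any_eq_true, List.any_eq_true]
  constructor
  · rintro ⟨k, hk, hke⟩
    exact ⟨k, hk, beq_iff_eq.mpr (beq_iff_eq.mp hke).symm⟩
  · rintro ⟨k, hk, hke⟩
    exact ⟨k, hk, beq_iff_eq.mpr (beq_iff_eq.mp hke).symm⟩

-- the main invariant: A's dict items are exactly B's keys with B's per-key statistics
theorem items_char (ps : List (String × String)) :
    (ps.foldl stepP PySem.Dict.empty).items =
      (ps.foldl keyStep []).map (fun k => (k, entry ps k)) := by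
  induction ps using List.reverseRecOn with
  | nil => simp [PySem.Dict.empty, entry]
  | append_singleton ps q ih =>
    rw [List.foldl_append, List.foldl_append]
    set K := ps.foldl keyStep [] with hK
    have hcont : (ps.foldl stepP PySem.Dict.empty).contains q.1 = K.contains q.1 := by
      simp only [PySem.Dict.contains, ih, List.any_map]
      exact any_beq_symm K q.1
    by_cases hc : K.contains q.1 = true
    · -- key already seen: dict modify in place; key list unchanged
      have hmem : q.1 ∈ K := by simpa using hc
      have hget : (ps.foldl stepP PySem.Dict.empty).get? q.1 = some (entry ps q.1) := by
        simp only [PySem.Dict.get?, ih]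
        rw [List.find?_map]
        have hfind : K.find? ((fun p : String × (Int × List String) => p.1 == q.1) ∘
            (fun k => (k, entry ps k))) = K.find? (fun k => k == q.1) := rfl
        rw [hfind]
        cases hfq : K.find? (fun k => k == q.1) with
        | none =>
          exact absurd (beq_self_eq_true q.1)
            (by simpa using List.find?_eq_none.mp hfq q.1 hmem)
        | some k0 =>
          have hk0 : k0 = q.1 := by simpa using List.find?_some hfq
          simp [hk0]
      simp only [List.foldl_cons, List.foldl_nil, stepP, hcont, hc, if_pos, keyStep]
      rw [PySem.Dict.modify]
      have hgd : (ps.foldl stepP PySem.Dict.empty).getD q.1 (0, []) = entry ps q.1 := by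
        rw [PySem.Dict.getD, hget]
        rfl
      rw [hgd, PySem.Dict.insert, hcont, hc]
      simp only [if_pos, ih, List.map_map]
      apply List.map_congr_left
      intro k hkK
      simp only [Function.comp]
      by_cases hkq : (k == q.1) = true
      · have hkq' : k = q.1 := by simpa using hkq
        subst hkq'
        simp [entry_append_self ps q]
      · have hne : q.1 ≠ k := fun h => hkq (by simp [h])
        simp [hkq, entry_append_ne ps q k hne]
    · -- new key: dict appends; key list appends
      have hnm : q.1 ∉ K := fun h => hc (by simpa using h)
      have hnm' : q.1 ∉ ps.map Prod.fst := by
        intro h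
        exact hnm ((mem_keys_foldl ps [] q.1).2 (Or.inr h))
      simp only [List.foldl_cons, List.foldl_nil, stepP, hcont, hc, Bool.false_eq_true, if_false, keyStep]
      rw [PySem.Dict.insert, hcont]
      simp only [hc, Bool.false_eq_true, if_false, ih, List.map_append, List.map_cons,
        List.map_nil]
      congr 1
      · apply List.map_congr_left
        intro k hkK
        have hkps : k ∈ ps.map Prod.fst :=
          ((mem_keys_foldl ps [] k).1 hkK).resolve_left (by simp)
        have hne : q.1 ≠ k := fun h => hnm' (h ▸ hkps)
        rw [entry_append_ne ps q k hne]
      · rw [entry_append_self ps q, entry_of_not_mem ps q.1 hnm']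
        simp

theorem solvePairs_eq_map (arr : List String) : solvePairs arr = arr.map splitF := by
  rw [solvePairs]
  exact PySem.List.foldl_append_singleton_eq_map splitF arr []

-- the two format functions (alpha-equal to the bodies in the ports)
def fmtA (p : String × (Int × List String)) : String :=
  p.1 ++ ":" ++ PySem.Int.toStr p.2.1 ++ "," ++ ((PySem.List.max? p.2.2 (fun x => x)).getD "")

def fmtB (pairs : List (String × String)) (k : String) : String :=
  let names := (pairs.filter (fun kn => kn.1 == k)).map (fun kn => kn.2)
  k ++ ":" ++ PySem.Int.toStr (names.length : Int) ++ "," ++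
    ((PySem.List.max? names (fun x => x)).getD "")

theorem solve_eq (arr : List String) :
    solve arr = (arr.foldl solveAStep PySem.Dict.empty).items.map fmtA := rfl

theorem solve_alt_eq (arr : List String) :
    solve_alt arr = (solveKeys (solvePairs arr)).map (fmtB (solvePairs arr)) := by
  show (solveKeys (solvePairs arr)).foldl
      (fun out k => out ++ [fmtB (solvePairs arr) k]) [] = _
  exact PySem.List.foldl_append_singleton_eq_map _ _ []

theorem foldl_solveAStep_eq (arr : List String) :
    arr.foldl solveAStep PySem.Dict.empty = (arr.map splitF).foldl stepP PySem.Dict.empty := by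
  rw [List.foldl_map]
  rfl

-- ===== VERDICT (by name: the statement is the Claim_ definition above) =====
theorem solve_spec : Claim_equal_solve := by
  intro arr _ _
  unfold Spec_solve
  rw [solve_eq, solve_alt_eq, solvePairs_eq_map, foldl_solveAStep_eq, items_char]
  rw [List.map_map]
  apply List.map_congr_left
  intro k _
  simp [Function.comp, fmtA, fmtB, entry, List.length_map]
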